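-- pv_equiv track=rewrite | github.com/ramge132/SSAFY_Daejeon_Algorithm | seokbangguri/BAEKJOON/[BOJ]테트로미노_G4_1.5H.py | changeShape
-- ===== SOURCE A (Python) =====
-- def changeShape(tetro, change_no):
--     '''
--     - tetro: 테트로노미노
--     - change_no: 변경 할 모양
--         1. 그대로
--         2. 좌우반전
--         3. 상하반전
--         4. 좌우반전 and 상하반전
--         5. 90도 회전
--         6. 90도 회전 후 좌우반전
--         7. 90도 회전 후 상하반전
--         8. 90도 회전 후 좌우반전 and 상하반전
--     '''
--     if change_no == 1:
--         return tetro
--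
--     elif change_no == 2:
--         for i in range(len(tetro)):
--             tetro[i] = tetro[i][::-1]
--         return tetro
--
--     elif change_no == 3:
--         return tetro[::-1]
--
--     elif change_no == 4:
--         for i in range(len(tetro)):
--             tetro[i] = tetro[i][::-1]
--         return tetro[::-1]
--
--     # 여기부터 기본 90도 회전
--     else:
--         tetro = list(zip(*tetro))[::-1]
--
--         if change_no == 5:
--             return tetro
--
--         elif change_no == 6:
--             for i in range(len(tetro)):
--                 tetro[i] = tetro[i][::-1]
--             return tetro
--
--         elif change_no == 7:
--             return tetro[::-1]
--
--         elif change_no == 8: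
--             for i in range(len(tetro)):
--                 tetro[i] = tetro[i][::-1]
--             return tetro[::-1]
-- ===== SOURCE B (Python) =====
-- def changeShape(tetro, change_no):
--     # Direct index-mapping construction: each output cell is computed from a
--     # closed-form source index, instead of composing whole-matrix transforms.
--     # Return-value equivalence only: A mutates tetro in place for change_no 2/4.
--     n = len(tetro)
--     if change_no <= 4:
--         out = []
--         for i in range(n):
--             row = tetro[n - 1 - i] if change_no in (3, 4) else tetro[i]
--             if change_no in (2, 4):
--                 row = [row[len(row) - 1 - j] for j in range(len(row))]
--             out.append(row)
--         return out
--     m = min((len(r) for r in tetro), default=0)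
--     out = []
--     for i in range(m):
--         row = []
--         for k in range(n):
--             r = m - 1 - i if change_no in (5, 6) else i
--             c = n - 1 - k if change_no in (6, 8) else k
--             row.append(tetro[c][r])
--         out.append(row)
--     return out
-- ===== Notes on version B (the rewrite author's own statement) =====
-- stated objective: alternative
-- what changed: Replaces A's eight branches of whole-matrix transforms (in-place row-reversal loops, slice reversal, zip-transpose) by direct index-mapping construction: every output cell is filled from a closed-form source index (row/column arithmetic per variant) in one nested loop; equivalence is about the return value only since A mutates its argument in cases 2 and 4.
-- outside the precondition, e.g. on changeShape([[1, 2]], 9): A returns None, B returns [[1], [2]]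
import Mathlib
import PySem

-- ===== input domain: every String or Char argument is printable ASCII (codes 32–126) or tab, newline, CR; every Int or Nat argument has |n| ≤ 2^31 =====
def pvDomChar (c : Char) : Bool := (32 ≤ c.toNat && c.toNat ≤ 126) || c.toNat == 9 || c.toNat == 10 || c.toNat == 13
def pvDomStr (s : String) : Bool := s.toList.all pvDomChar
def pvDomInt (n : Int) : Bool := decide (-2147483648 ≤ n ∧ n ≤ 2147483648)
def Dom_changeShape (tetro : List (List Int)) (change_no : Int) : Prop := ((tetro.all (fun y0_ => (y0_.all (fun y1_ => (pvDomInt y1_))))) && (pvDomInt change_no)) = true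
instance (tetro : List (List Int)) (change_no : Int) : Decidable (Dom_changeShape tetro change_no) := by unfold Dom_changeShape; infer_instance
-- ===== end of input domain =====

-- B builds the result by direct index mapping (closed-form source index per output cell)
-- instead of A's eight branches of whole-matrix transforms; equivalence is about the
-- RETURN value only (A mutates tetro in place for change_no 2 and 4).


-- ===== PORT A =====
-- zip(*rows): tuples of columns, truncated to the shortest row
def pyZipStar (rows : List (List Int)) : List (List Int) :=
  match (rows.map List.length).min? with
  | none => []
  | some m => (List.range m).map (fun j => rows.map (fun r => r.getD j 0))

-- the in-place loop 'for i in range(len(tetro)): tetro[i] = tetro[i][::-1]'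
def hflipA (t : List (List Int)) : List (List Int) :=
  (PySem.List.pyRange 0 (t.length : Int) 1).foldl
    (fun acc i => acc.set i.toNat ((acc.getD i.toNat []).reverse)) t

def changeShape (tetro : List (List Int)) (change_no : Int) : List (List Int) :=
  if change_no = 1 then tetro
  else if change_no = 2 then hflipA tetro
  else if change_no = 3 then tetro.reverse
  else if change_no = 4 then (hflipA tetro).reverse
  else
    let t := (pyZipStar tetro).reverse
    if change_no = 5 then t
    else if change_no = 6 then hflipA t
    else if change_no = 7 then t.reverse
    else if change_no = 8 then (hflipA t).reverse
    else []   -- Python falls off and returns None here; excluded by Pre_changeShape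

-- ===== PORT B =====
def changeShape_alt (tetro : List (List Int)) (change_no : Int) : List (List Int) :=
  let n := tetro.length
  if change_no ≤ 4 then
    (List.range n).map (fun i =>
      let row := if change_no = 3 ∨ change_no = 4 then tetro.getD (n - 1 - i) []
                 else tetro.getD i []
      if change_no = 2 ∨ change_no = 4 then
        (List.range row.length).map (fun j => row.getD (row.length - 1 - j) 0)
      else row)
  else
    let m := ((tetro.map List.length).min?).getD 0
    (List.range m).map (fun i =>
      (List.range n).map (fun k =>
        let r := if change_no = 5 ∨ change_no = 6 then m - 1 - i else i
        let c := if change_no = 6 ∨ change_no = 8 then n - 1 - k else k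
        (tetro.getD c []).getD r 0))

-- ===== PRECONDITION & SPEC =====
-- Pre_ excludes change_no outside 1..8, where A returns None (not a list).
def Pre_changeShape (tetro : List (List Int)) (change_no : Int) : Prop :=
  1 ≤ change_no ∧ change_no ≤ 8
instance (tetro : List (List Int)) (change_no : Int) : Decidable (Pre_changeShape tetro change_no) := by unfold Pre_changeShape; infer_instance
def pvWitness_changeShape : List (List Int) × Int := ([[1, 2], [3, 4]], 6)

def Spec_changeShape (tetro : List (List Int)) (change_no : Int) (out : List (List Int)) : Prop := out = changeShape_alt tetro change_no
instance (tetro : List (List Int)) (change_no : Int) (out : List (List Int)) : Decidable (Spec_changeShape tetro change_no out) := by unfold Spec_changeShape; infer_instance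

-- ===== CLAIM =====
def Claim_equal_changeShape : Prop := ∀ (tetro : List (List Int)) (change_no : Int), Dom_changeShape tetro change_no → Pre_changeShape tetro change_no → Spec_changeShape tetro change_no (changeShape tetro change_no)

-- ===== LEMMAS AND PROOFS =====

-- the in-place index loop of A reverses every row
theorem hflipA_loop_inv (n k : Nat) (t : List (List Int)) (h : t.length = k + n) :
    (List.range' k n).foldl (fun acc i => acc.set i ((acc.getD i []).reverse)) t
      = t.take k ++ (t.drop k).map List.reverse := by
  induction n generalizing k t with
  | zero =>
      have hd : t.drop k = [] := List.drop_eq_nil_of_le (by omega)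
      have ht : t.take k = t := List.take_of_length_le (by omega)
      simp [hd, ht]
  | succ n ih =>
      have hk : k < t.length := by omega
      rw [List.range'_succ, List.foldl_cons,
          ih (k + 1) _ (by simp [h]; omega)]
      have hg : t[k]? = some t[k] := List.getElem?_eq_getElem hk
      have hdrop : (t.set k ((t.getD k []).reverse)).drop (k + 1) = t.drop (k + 1) := by
        rw [List.drop_set]; simp
      have htake : (t.set k ((t.getD k []).reverse)).take (k + 1)
          = t.take k ++ [(t[k]).reverse] := by
        rw [List.take_set, List.getD_eq_getElem t [] hk]
        have h1 : t.take (k + 1) = t.take k ++ [t[k]] := by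
          rw [List.take_add_one, hg]; rfl
        have h2 : (t.take k).length = k := by
          simp [Nat.min_eq_left hk.le]
        rw [h1, List.set_append, h2]
        simp
      have hdk : t.drop k = t[k] :: t.drop (k + 1) := List.drop_eq_getElem_cons hk
      rw [hdrop, htake, hdk, List.map_cons, List.append_assoc]
      rfl

theorem hflipA_eq (t : List (List Int)) : hflipA t = t.map List.reverse := by
  unfold hflipA
  rw [PySem.List.pyRange_one]
  have : ((t.length : Int) - 0).toNat = t.length := by simp
  rw [this, List.foldl_map]
  have hfun : ∀ (acc : List (List Int)) (k : Nat),
      acc.set ((0 + (k : Int)).toNat) ((acc.getD ((0 + (k : Int)).toNat) []).reverse)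
        = acc.set k ((acc.getD k []).reverse) := by intro acc k; norm_num
  calc (List.range t.length).foldl
        (fun acc k => acc.set ((0 + (k : Int)).toNat) ((acc.getD ((0 + (k : Int)).toNat) []).reverse)) t
      = (List.range t.length).foldl (fun acc k => acc.set k ((acc.getD k []).reverse)) t := by
        congr 1; funext acc k; exact hfun acc k
    _ = t.take 0 ++ (t.drop 0).map List.reverse := by
        rw [List.range_eq_range']; exact hflipA_loop_inv t.length 0 t (by omega)
    _ = t.map List.reverse := by simp

-- reading a list back by index equals mapping over it
theorem mapRange_getD {α β : Type} (l : List α) (d : α) (g : α → β) :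
    (List.range l.length).map (fun k => g (l.getD k d)) = l.map g := by
  induction l with
  | nil => simp
  | cons a t ih =>
      rw [List.length_cons, List.range_succ_eq_map, List.map_cons, List.map_map]
      simp only [Function.comp_def, List.getD_cons_zero, List.getD_cons_succ]
      rw [ih, List.map_cons]

-- reading it back in reversed index order reverses the mapped list
theorem mapRange_getD_rev {α β : Type} (l : List α) (d : α) (g : α → β) :
    (List.range l.length).map (fun k => g (l.getD (l.length - 1 - k) d)) = (l.map g).reverse := by
  have h : ∀ k ∈ List.range l.length,
      g (l.getD (l.length - 1 - k) d) = g (l.reverse.getD k d) := by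
    intro k hk
    rw [List.mem_range] at hk
    rw [List.getD_eq_getElem _ d (by omega),
        List.getD_eq_getElem _ d (by simpa using hk), List.getElem_reverse]
  rw [List.map_congr_left h]
  have := mapRange_getD l.reverse d g
  rw [List.length_reverse] at this
  rw [this, List.map_reverse]

-- reversing a map over range flips the index
theorem reverse_mapRange {β : Type} (m : Nat) (f : Nat → β) :
    ((List.range m).map f).reverse = (List.range m).map (fun i => f (m - 1 - i)) := by
  apply List.ext_getElem
  · simp
  · intro i h1 h2
    simp only [List.length_reverse, List.length_map, List.length_range] at h1 h2
    rw [List.getElem_reverse, List.getElem_map, List.getElem_map,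
        List.getElem_range, List.getElem_range]
    simp only [List.length_map, List.length_range]


-- tetro = [] when min? of row lengths is none
theorem min_none_nil (tetro : List (List Int))
    (h : (tetro.map List.length).min? = none) : tetro = [] := by
  cases tetro with
  | nil => rfl
  | cons a t => simp [List.min?] at h

theorem case1 (tetro : List (List Int)) :
    changeShape tetro 1 = changeShape_alt tetro 1 := by
  simp only [changeShape, changeShape_alt]
  norm_num
  exact ((mapRange_getD tetro [] id).trans (List.map_id _)).symm

theorem case2 (tetro : List (List Int)) :
    changeShape tetro 2 = changeShape_alt tetro 2 := by
  simp only [changeShape, changeShape_alt]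
  norm_num [hflipA_eq]
  have hin : ∀ (row : List Int),
      (List.range row.length).map (fun j => row.getD (row.length - 1 - j) 0) = row.reverse :=
    fun row => (mapRange_getD_rev row 0 id).trans (by rw [List.map_id])
  calc tetro.map List.reverse
      = (List.range tetro.length).map (fun i => (tetro.getD i []).reverse) :=
        (mapRange_getD tetro [] List.reverse).symm
    _ = (List.range tetro.length).map (fun i =>
          (List.range (tetro.getD i []).length).map
            (fun j => (tetro.getD i []).getD ((tetro.getD i []).length - 1 - j) 0)) := by
        exact List.map_congr_left (fun i _ => (hin (tetro.getD i [])).symm)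

theorem case3 (tetro : List (List Int)) :
    changeShape tetro 3 = changeShape_alt tetro 3 := by
  simp only [changeShape, changeShape_alt]
  norm_num
  exact ((mapRange_getD_rev tetro [] id).trans (by rw [List.map_id])).symm

theorem case4 (tetro : List (List Int)) :
    changeShape tetro 4 = changeShape_alt tetro 4 := by
  simp only [changeShape, changeShape_alt]
  norm_num [hflipA_eq]
  have hin : ∀ (row : List Int),
      (List.range row.length).map (fun j => row.getD (row.length - 1 - j) 0) = row.reverse :=
    fun row => (mapRange_getD_rev row 0 id).trans (by rw [List.map_id])
  calc (tetro.map List.reverse).reverse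
      = (List.range tetro.length).map (fun i => (tetro.getD (tetro.length - 1 - i) []).reverse) :=
        (mapRange_getD_rev tetro [] List.reverse).symm
    _ = (List.range tetro.length).map (fun i =>
          (List.range (tetro.getD (tetro.length - 1 - i) []).length).map
            (fun j => (tetro.getD (tetro.length - 1 - i) []).getD
              ((tetro.getD (tetro.length - 1 - i) []).length - 1 - j) 0)) :=
        List.map_congr_left (fun i _ => (hin _).symm)

-- the rotated matrix of A, written as an index map
theorem rot_eq (tetro : List (List Int)) (m : Nat)
    (hm : (tetro.map List.length).min? = some m) :
    (pyZipStar tetro).reverse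
      = (List.range m).map (fun i => tetro.map (fun r => r.getD (m - 1 - i) 0)) := by
  unfold pyZipStar
  rw [hm, reverse_mapRange]

theorem case5678 (tetro : List (List Int)) (cn : Int)
    (h : cn = 5 ∨ cn = 6 ∨ cn = 7 ∨ cn = 8) :
    changeShape tetro cn = changeShape_alt tetro cn := by
  cases hmin : (tetro.map List.length).min? with
  | none =>
      have ht : tetro = [] := min_none_nil tetro hmin
      subst ht
      rcases h with h | h | h | h <;> subst h <;> rfl
  | some m =>
      have hrot := rot_eq tetro m hmin
      rcases h with h | h | h | h <;> subst h <;>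
        simp only [changeShape, changeShape_alt] <;> norm_num [hflipA_eq, hmin, hrot]
      · intro a _
        exact (mapRange_getD tetro [] (fun r => r.getD (m - 1 - a) 0)).symm
      · intro a _
        exact (mapRange_getD_rev tetro [] (fun r => r.getD (m - 1 - a) 0)).symm
      · rw [reverse_mapRange]
        refine List.map_congr_left (fun i hi => ?_)
        rw [List.mem_range] at hi
        have hidx : m - 1 - (m - 1 - i) = i := by omega
        rw [hidx]
        exact (mapRange_getD tetro [] (fun r => r.getD i 0)).symm
      · rw [reverse_mapRange]
        refine List.map_congr_left (fun i hi => ?_)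
        rw [List.mem_range] at hi
        have hidx : m - 1 - (m - 1 - i) = i := by omega
        simp only [Function.comp_def, hidx]
        exact (mapRange_getD_rev tetro [] (fun r => r.getD i 0)).symm

-- ===== VERDICT =====
theorem changeShape_spec : Claim_equal_changeShape := by
  intro tetro cn _ hpre
  obtain ⟨h1, h8⟩ := hpre
  unfold Spec_changeShape
  have hcase : cn = 1 ∨ cn = 2 ∨ cn = 3 ∨ cn = 4 ∨ cn = 5 ∨ cn = 6 ∨ cn = 7 ∨ cn = 8 := by
    omega
  rcases hcase with h | h | h | h | h | h | h | h <;> subst h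
  · exact case1 tetro
  · exact case2 tetro
  · exact case3 tetro
  · exact case4 tetro
  all_goals exact case5678 tetro _ (by tauto)
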